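-- pv_equiv track=rewrite | github.com/Sety-project/pylibs | mess/amberdata.py | regular_dates
-- ===== SOURCE A (Python) =====
-- def regular_dates(start_date: int, end_date: int, frequency: int) -> list[tuple[int, int]]:
--     if frequency is None:
--         return [(start_date, end_date)]
--
--     t = max(start_date, end_date - frequency)
--     result = [(int(t), int(end_date))]
--     while t > start_date:
--         result.append((int(max(start_date, t - frequency)), int(t)))
--         t -= frequency
--     return result
-- ===== SOURCE B (Python) =====
-- def regular_dates(start_date: int, end_date: int, frequency: int) -> list[tuple[int, int]]:
--     if frequency is None:
--         return [(start_date, end_date)]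
--     # closed-form interval count instead of stepping: n = max(1, ceil((end-start)/frequency))
--     n = max(1, -(-(end_date - start_date) // frequency))
--     return [(max(start_date, end_date - (i + 1) * frequency), end_date - i * frequency)
--             for i in range(n)]
-- ===== Notes on version B (the rewrite author's own statement) =====
-- stated objective: alternative
-- what changed: Replaces A's while loop that repeatedly subtracts frequency and appends to a mutable accumulator by a closed-form computation: the interval count n = max(1, ceil((end-start)/frequency)) is obtained by one ceiling division and each interval is computed directly from its index by multiplication, with no stepping state.
-- outside the precondition, e.g. on regular_dates(5, 3, 0): A returns [(5, 3)], B raises ZeroDivisionError; on regular_dates(5, 2, -2): A returns [(5, 2)], B returns [(5, 2), (6, 4)]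
import Mathlib
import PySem

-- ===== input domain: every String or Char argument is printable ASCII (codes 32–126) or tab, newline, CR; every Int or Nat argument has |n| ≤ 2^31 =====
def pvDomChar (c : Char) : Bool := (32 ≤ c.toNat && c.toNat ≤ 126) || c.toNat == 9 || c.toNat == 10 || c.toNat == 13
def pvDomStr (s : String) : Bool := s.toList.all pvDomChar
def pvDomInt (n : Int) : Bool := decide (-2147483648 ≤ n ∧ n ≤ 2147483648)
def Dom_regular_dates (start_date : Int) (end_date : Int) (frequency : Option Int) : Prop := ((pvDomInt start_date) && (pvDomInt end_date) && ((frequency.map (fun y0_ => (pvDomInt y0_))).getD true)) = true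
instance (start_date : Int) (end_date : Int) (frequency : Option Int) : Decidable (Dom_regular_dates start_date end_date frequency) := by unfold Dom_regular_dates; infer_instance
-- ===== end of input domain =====

-- B replaces A's stepping while-loop by a closed-form interval count (one ceiling
-- division) plus direct index-to-interval computation — objective: alternative.


-- ===== PORT A =====
-- A's while loop; the fuel argument only makes the recursion total (on Pre_,
-- frequency ≥ 1, the supplied fuel is enough and never runs out).
def regularDatesLoopA (s f : Int) : Nat → Int → List (Int × Int) → List (Int × Int)
  | 0, _, res => res
  | fuel + 1, t, res =>
    if t > s then regularDatesLoopA s f fuel (t - f) (res ++ [(max s (t - f), t)])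
    else res

def regular_dates (start_date : Int) (end_date : Int) (frequency : Option Int) : List (Int × Int) :=
  match frequency with
  | none => [(start_date, end_date)]
  | some f =>
    let t := max start_date (end_date - f)
    regularDatesLoopA start_date f (t - start_date).toNat t [(t, end_date)]

-- ===== PORT B =====
def regular_dates_alt (start_date : Int) (end_date : Int) (frequency : Option Int) : List (Int × Int) :=
  match frequency with
  | none => [(start_date, end_date)]
  | some f =>
    let n := max 1 (-(PySem.Int.floordiv (-(end_date - start_date)) f))
    (PySem.List.pyRange 0 n 1).map
      (fun i => (max start_date (end_date - (i + 1) * f), end_date - i * f))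

-- ===== PRECONDITION & SPEC =====
-- Pre_ excludes non-positive frequency, outside the function's natural domain: there A
-- diverges whenever its loop is entered, and on the remaining corners B raises
-- ZeroDivisionError (frequency 0) or returns an ascending multi-interval split where A
-- returns one interval.
def Pre_regular_dates (start_date : Int) (end_date : Int) (frequency : Option Int) : Prop :=
  0 < frequency.getD 1
instance (start_date : Int) (end_date : Int) (frequency : Option Int) : Decidable (Pre_regular_dates start_date end_date frequency) := by unfold Pre_regular_dates; infer_instance

def pvWitness_regular_dates : Int × Int × Option Int := (3, 17, some 5)

def Spec_regular_dates (start_date : Int) (end_date : Int) (frequency : Option Int) (out : List (Int × Int)) : Prop := out = regular_dates_alt start_date end_date frequency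
instance (start_date : Int) (end_date : Int) (frequency : Option Int) (out : List (Int × Int)) : Decidable (Spec_regular_dates start_date end_date frequency out) := by unfold Spec_regular_dates; infer_instance

-- ===== CLAIM (what is proved, stated in full; the proofs are below) =====
def Claim_equal_regular_dates : Prop := ∀ (start_date : Int) (end_date : Int) (frequency : Option Int), Dom_regular_dates start_date end_date frequency → Pre_regular_dates start_date end_date frequency → Spec_regular_dates start_date end_date frequency (regular_dates start_date end_date frequency)

-- ===== LEMMAS AND PROOFS =====
theorem pyRange_negf_nil (a b f : Int) (hf : 0 < f) (h : a ≤ b) :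
    PySem.List.pyRange a b (-f) = [] := by
  rw [PySem.List.pyRange]
  split_ifs <;> simp_all <;> omega

theorem pyRange_negf_cons (a b f : Int) (hf : 0 < f) (h : b < a) :
    PySem.List.pyRange a b (-f) = a :: PySem.List.pyRange (a - f) b (-f) := by
  rw [PySem.List.pyRange, PySem.List.pyRange]
  simp only [if_neg (by omega : ¬ (-f = 0))]
  have h1 : ¬ (0 < -f) := by omega
  simp only [if_neg h1, if_pos h, neg_neg]
  by_cases h2 : b < a - f
  · have hcount : (a - b + f - 1) / f = (a - f - b + f - 1) / f + 1 := by
      have := Int.add_mul_ediv_right (a - f - b + f - 1) 1 (by omega : f ≠ 0)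
      have heq : a - b + f - 1 = a - f - b + f - 1 + 1 * f := by ring
      rw [heq, this]
    have hpos : 0 ≤ (a - f - b + f - 1) / f := Int.ediv_nonneg (by omega) (by omega)
    have htoNat : ((a - b + f - 1) / f).toNat = ((a - f - b + f - 1) / f).toNat + 1 := by
      rw [hcount]; omega
    simp only [if_pos h2, htoNat, List.range_succ_eq_map, List.map_cons, List.map_map]
    congr 1
    · norm_num
    · apply List.map_congr_left
      intro k _
      simp only [Function.comp]
      push_cast
      ring
  · have hle : a - b ≤ f := by omega
    have hone : (a - b + f - 1) / f = 1 := by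
      have heq : a - b + f - 1 = (a - b - 1) + 1 * f := by ring
      rw [heq, Int.add_mul_ediv_right _ _ (by omega : f ≠ 0),
        Int.ediv_eq_zero_of_lt (by omega) (by omega)]
      norm_num
    simp only [if_neg h2, hone]
    norm_num

theorem loopA_eq (s f : Int) (hf : 1 ≤ f) :
    ∀ (fuel : Nat) (t : Int) (res : List (Int × Int)), (t - s).toNat ≤ fuel →
      regularDatesLoopA s f fuel t res =
        res ++ (PySem.List.pyRange t s (-f)).map (fun h => (max s (h - f), h)) := by
  intro fuel
  induction fuel with
  | zero =>
    intro t res hle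
    have hts : t ≤ s := by omega
    rw [regularDatesLoopA, pyRange_negf_nil t s f (by omega) hts]
    simp
  | succ n ih =>
    intro t res hle
    rw [regularDatesLoopA]
    by_cases hgt : t > s
    · rw [if_pos hgt, ih (t - f) (res ++ [(max s (t - f), t)]) (by omega),
        pyRange_negf_cons t s f (by omega) hgt]
      simp
    · rw [if_neg hgt, pyRange_negf_nil t s f (by omega) (by omega)]
      simp

-- both sides empty when t ≤ s: the loop does not run and the ceiling count is ≤ 0
theorem desc_to_idx_nil (s f t : Int) (hf : 0 < f) (hts : t ≤ s) :
    (PySem.List.pyRange t s (-f)).map (fun h => (max s (h - f), h)) =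
      (List.range (-(PySem.Int.floordiv (-(t - s)) f)).toNat).map
        (fun (i : Nat) => (max s (t - ((i : Int) + 1) * f), t - (i : Int) * f)) := by
  have h0 : 0 ≤ PySem.Int.floordiv (-(t - s)) f := by
    rw [PySem.Int.floordiv_eq_ediv_of_pos hf]
    exact Int.ediv_nonneg (by omega) (by omega)
  rw [pyRange_negf_nil t s f hf hts]
  have hz : (-(PySem.Int.floordiv (-(t - s)) f)).toNat = 0 := by omega
  rw [hz]
  simp

-- ceiling count decreases by exactly one per loop step
theorem ceil_step (s f t : Int) (hf : 0 < f) :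
    PySem.Int.floordiv (-(t - s)) f = PySem.Int.floordiv (-(t - f - s)) f - 1 := by
  rw [PySem.Int.floordiv_eq_ediv_of_pos hf, PySem.Int.floordiv_eq_ediv_of_pos hf]
  have heq : -(t - f - s) = -(t - s) + 1 * f := by ring
  rw [heq, Int.add_mul_ediv_right _ _ (by omega : f ≠ 0)]
  ring

-- the descending-range map equals the index-based map with the ceiling count
theorem desc_to_idx (s f : Int) (hf : 0 < f) :
    ∀ (fuel : Nat) (t : Int), (t - s).toNat ≤ fuel →
      (PySem.List.pyRange t s (-f)).map (fun h => (max s (h - f), h)) =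
        (List.range (-(PySem.Int.floordiv (-(t - s)) f)).toNat).map
          (fun (i : Nat) => (max s (t - ((i : Int) + 1) * f), t - (i : Int) * f)) := by
  intro fuel
  induction fuel with
  | zero =>
    intro t hle
    exact desc_to_idx_nil s f t hf (by omega)
  | succ n ih =>
    intro t hle
    by_cases hgt : s < t
    · have hneg : PySem.Int.floordiv (-(t - s)) f < 0 := by
        rw [PySem.Int.floordiv_eq_ediv_of_pos hf]
        exact Int.ediv_neg_of_neg_of_pos (by omega) hf
      have h0 : 0 ≤ PySem.Int.floordiv (-(t - f - s)) f ∨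
          PySem.Int.floordiv (-(t - f - s)) f < 0 := by omega
      have hcnt : (-(PySem.Int.floordiv (-(t - s)) f)).toNat =
          (-(PySem.Int.floordiv (-(t - f - s)) f)).toNat + 1 := by
        have := ceil_step s f t hf
        omega
      rw [pyRange_negf_cons t s f hf hgt, List.map_cons, ih (t - f) (by omega),
        hcnt, List.range_succ_eq_map, List.map_cons, List.map_map]
      congr 1
      · norm_num
      · apply List.map_congr_left
        intro k _
        simp only [Function.comp]
        refine Prod.ext ?_ ?_
        · simp only
          congr 1
          push_cast
          ring
        · simp only
          push_cast
          ring
    · exact desc_to_idx_nil s f t hf (by omega)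

-- ===== VERDICT (by name: the statement is the Claim_ definition above) =====
theorem regular_dates_spec : Claim_equal_regular_dates := by
  intro s e freq _ hpre
  unfold Spec_regular_dates regular_dates regular_dates_alt
  match freq with
  | none => rfl
  | some f =>
    have hf : 0 < f := hpre
    simp only
    rw [loopA_eq s f (by omega) _ _ _ (le_refl _),
      desc_to_idx s f hf _ (max s (e - f)) (le_refl _),
      PySem.List.pyRange_one]
    simp only [List.singleton_append, List.map_map, Int.sub_zero]
    by_cases h1 : s < e - f
    · -- more than one interval: start of the loop is e - f
      have ht0 : max s (e - f) = e - f := by omega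
      have hstep := ceil_step s f e hf
      have hneg : PySem.Int.floordiv (-(e - s)) f < 0 := by
        rw [PySem.Int.floordiv_eq_ediv_of_pos hf]
        exact Int.ediv_neg_of_neg_of_pos (by omega) hf
      have hn : (max 1 (-(PySem.Int.floordiv (-(e - s)) f))).toNat =
          (-(PySem.Int.floordiv (-(e - f - s)) f)).toNat + 1 := by omega
      rw [ht0, hn, List.range_succ_eq_map, List.map_cons, List.map_map]
      congr 1
      · norm_num
        omega
      · apply List.map_congr_left
        intro k _
        simp only [Function.comp]
        refine Prod.ext ?_ ?_
        · simp only
          congr 1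
          push_cast
          ring
        · simp only
          push_cast
          ring
    · -- single interval
      have ht0 : max s (e - f) = s := by omega
      have hc0 : (-(PySem.Int.floordiv (-(s - s)) f)).toNat = 0 := by
        have : -(s - s) = 0 := by ring
        rw [this, PySem.Int.floordiv_eq_ediv_of_pos hf, Int.zero_ediv]
        simp
    -- n = 1 whether or not the range is degenerate
      have hn : (max 1 (-(PySem.Int.floordiv (-(e - s)) f))).toNat = 1 := by
        by_cases hes : e ≤ s
        · have h0 : 0 ≤ PySem.Int.floordiv (-(e - s)) f := by
            rw [PySem.Int.floordiv_eq_ediv_of_pos hf]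
            exact Int.ediv_nonneg (by omega) (by omega)
          omega
        · have hone : PySem.Int.floordiv (-(e - s)) f = -1 := by
            rw [PySem.Int.floordiv_eq_iff_of_pos hf]
            constructor <;> omega
          omega
      rw [ht0, hc0, hn]
      norm_num
      omega
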